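-- pv_equiv track=rewrite | github.com/devolo/pytest-adaptavist | pytest_adaptavist.py | calc_test_result_status
-- ===== SOURCE A (Python) =====
-- def calc_test_result_status(step_results):
--     """Calculate overall test result status from list of step results.
--
--         According to Adaptavist test management:
--
--             Blocked & Not Executed -> Blocked
--             Blocked & In Progress -> Blocked
--             Blocked & Pass -> Blocked
--             Blocked & Fail -> Fail
--
--             Fail & Not Executed -> Fail
--             Fail & In Progress -> Fail
--             Fail & Pass -> Fail
--
--             Pass & Not Executed -> In Progress
--             Pass & In Progress -> In Progress
--
--             In Progress & Not Executed -> In Progress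
--     """
--     # map representing status as binary/hex number to be used with & operator
--     status_map = {
--         "Not Executed": 0xB,  # 1011
--         "Pass": 0x7,          # 0111
--         "In Progress": 0x3,   # 0011
--         "Blocked": 0x1,       # 0001
--         "Fail": 0x0           # 0000
--     }
--     if not step_results:
--         return "Not Executed"
--     status = 0xF
--     for result in step_results:
--         status = status & status_map[result["status"]]
--
--     return [k for k, v in status_map.items() if v == status][0]
-- ===== SOURCE B (Python) =====
-- def calc_test_result_status(step_results):
--     """Overall test status by explicit precedence over the distinct step statuses."""
--     allowed = ("Not Executed", "Pass", "In Progress", "Blocked", "Fail")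
--     if not step_results:
--         return "Not Executed"
--     seen = set()
--     for result in step_results:
--         status = result["status"]
--         if status not in allowed:
--             raise KeyError(status)
--         seen.add(status)
--     if "Fail" in seen:
--         return "Fail"
--     if "Blocked" in seen:
--         return "Blocked"
--     for single in ("Pass", "In Progress", "Not Executed"):
--         if seen == {single}:
--             return single
--     return "In Progress"
-- ===== Notes on version B (the rewrite author's own statement) =====
-- stated objective: simpler
-- what changed: Replaces the bitwise-AND fold over a hex status map plus reverse value lookup with a single pass collecting the distinct statuses into a set and an explicit precedence decision (Fail > Blocked > single status > In Progress).
import Mathlib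
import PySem

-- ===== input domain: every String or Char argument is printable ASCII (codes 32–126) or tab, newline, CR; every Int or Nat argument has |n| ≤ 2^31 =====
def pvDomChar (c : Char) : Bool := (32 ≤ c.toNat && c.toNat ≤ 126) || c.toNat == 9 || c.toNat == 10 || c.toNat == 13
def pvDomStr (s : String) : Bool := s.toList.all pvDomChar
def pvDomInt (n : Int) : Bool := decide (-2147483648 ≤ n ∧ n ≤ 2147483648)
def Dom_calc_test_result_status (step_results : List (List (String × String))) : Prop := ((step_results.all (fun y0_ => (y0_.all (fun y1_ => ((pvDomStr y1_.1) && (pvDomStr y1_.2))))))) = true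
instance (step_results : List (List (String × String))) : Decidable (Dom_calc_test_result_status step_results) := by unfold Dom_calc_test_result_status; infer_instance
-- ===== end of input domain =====

-- B replaces the bitwise-AND fold over a hex status map (and reverse value lookup) with a set of the
-- distinct statuses and explicit precedence logic (objective: simpler). Equivalence is about the return
-- value on Pre_ (all step statuses known); both Pythons raise KeyError outside it.

-- result["status"] (KeyError on a missing key is outside Pre_; the port's default "" is never a valid status)
def pvStatusOf (r : List (String × String)) : String := PySem.Dict.getD (PySem.Dict.mk r) "status" ""

-- ===== PORT A =====
-- the local dict literal status_map of A
def pvStatusMap : PySem.Dict String Nat :=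
  PySem.Dict.ofList [("Not Executed", 0xB), ("Pass", 0x7), ("In Progress", 0x3), ("Blocked", 0x1), ("Fail", 0x0)]

def calc_test_result_status (step_results : List (List (String × String))) : String :=
  if step_results = [] then "Not Executed"
  else
    -- status_map[result["status"]] raises KeyError on an unknown status: outside Pre_; the port uses the neutral default 15
    let status : Nat := step_results.foldl (fun status result => status &&& pvStatusMap.getD (pvStatusOf result) 15) 0xF
    -- [k for k, v in status_map.items() if v == status][0]; under Pre_ the list is nonempty, so [0] is headD
    (((pvStatusMap.items.filter (fun kv => kv.2 = status)).map (fun kv => kv.1)).headD "")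

-- ===== PORT B =====
def pvAllowed : List String := ["Not Executed", "Pass", "In Progress", "Blocked", "Fail"]

-- the loop 'for result in step_results: seen.add(result["status"])' (B's raise on an unknown status is outside Pre_)
def pvSeen (step_results : List (List (String × String))) : PySem.Set String :=
  step_results.foldl (fun seen result => PySem.Set.add seen (pvStatusOf result)) PySem.Set.empty

def calc_test_result_status_alt (step_results : List (List (String × String))) : String :=
  if step_results = [] then "Not Executed"
  else
    let seen := pvSeen step_results
    if PySem.Set.contains seen "Fail" then "Fail"
    else if PySem.Set.contains seen "Blocked" then "Blocked"
    else if PySem.Set.equal seen ["Pass"] then "Pass"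
    else if PySem.Set.equal seen ["In Progress"] then "In Progress"
    else if PySem.Set.equal seen ["Not Executed"] then "Not Executed"
    else "In Progress"

-- ===== PRECONDITION & SPEC =====
-- Pre_ excludes exactly the inputs where A raises KeyError: a step without a "status" key or with a status
-- outside the five known ones (pvStatusOf gives "" on a missing key, and "" is not in pvAllowed).
def Pre_calc_test_result_status (step_results : List (List (String × String))) : Prop :=
  ∀ r ∈ step_results, pvStatusOf r ∈ pvAllowed
instance (step_results : List (List (String × String))) : Decidable (Pre_calc_test_result_status step_results) := by unfold Pre_calc_test_result_status; infer_instance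

def pvWitness_calc_test_result_status : (List (List (String × String))) :=
  [[("status", "Pass")], [("status", "Blocked")]]

def Spec_calc_test_result_status (step_results : List (List (String × String))) (out : String) : Prop := out = calc_test_result_status_alt step_results
instance (step_results : List (List (String × String))) (out : String) : Decidable (Spec_calc_test_result_status step_results out) := by unfold Spec_calc_test_result_status; infer_instance

-- ===== CLAIM (what is proved, stated in full; the proofs are below) =====
def Claim_equal_calc_test_result_status : Prop := ∀ (step_results : List (List (String × String))), Dom_calc_test_result_status step_results → Pre_calc_test_result_status step_results → Spec_calc_test_result_status step_results (calc_test_result_status step_results)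

-- ===== LEMMAS AND PROOFS =====

-- the four AND-bits of A's accumulator, each a per-element "all" over the prefix processed so far
def pvBits (sr : List (List (String × String))) : Nat :=
    (if sr.all (fun r => pvStatusOf r == "Not Executed") then 8 else 0)
  + (if sr.all (fun r => pvStatusOf r == "Pass") then 4 else 0)
  + (if sr.all (fun r => !(pvStatusOf r == "Fail") && !(pvStatusOf r == "Blocked")) then 2 else 0)
  + (if sr.all (fun r => !(pvStatusOf r == "Fail")) then 1 else 0)

lemma pvBits_le (sr : List (List (String × String))) : pvBits sr ≤ 15 := by
  unfold pvBits; split_ifs <;> decide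

lemma pv_step (r : List (String × String)) (sr : List (List (String × String)))
    (hr : pvStatusOf r ∈ pvAllowed) :
    pvStatusMap.getD (pvStatusOf r) 15 &&& pvBits sr = pvBits (r :: sr) := by
  simp only [pvAllowed, List.mem_cons, List.not_mem_nil, or_false] at hr
  rcases hr with h | h | h | h | h <;>
    simp [pvBits, List.all_cons, h] <;>
    split_ifs <;> decide

lemma pv_fold (sr : List (List (String × String))) (h : ∀ r ∈ sr, pvStatusOf r ∈ pvAllowed)
    (acc : Nat) (hacc : acc ≤ 15) :
    sr.foldl (fun status result => status &&& pvStatusMap.getD (pvStatusOf result) 15) acc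
      = acc &&& pvBits sr := by
  induction sr generalizing acc with
  | nil =>
    simp [pvBits]
    interval_cases acc <;> decide
  | cons r l ih =>
    simp only [List.foldl_cons]
    rw [ih (fun x hx => h x (List.mem_cons_of_mem _ hx)) _
        (le_trans (Nat.and_le_left) hacc)]
    rw [Nat.and_assoc]
    rw [pv_step r l (h r List.mem_cons_self)]

lemma pv_seen_eq (sr : List (List (String × String))) :
    pvSeen sr = PySem.Set.ofList (sr.map pvStatusOf) := by
  rw [pvSeen, PySem.Set.ofList_eq_foldl, List.foldl_map]; rfl

lemma pv_mem_seen (sr : List (List (String × String))) (x : String) :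
    (x ∈ pvSeen sr) ↔ ∃ r ∈ sr, pvStatusOf r = x := by
  rw [pv_seen_eq, PySem.Set.mem_ofList, List.mem_map]

lemma pv_ofList_const (s : String) (xs : List String) (h : ∀ x ∈ xs, x = s) :
    PySem.Set.ofList (s :: xs) = [s] := by
  rw [PySem.Set.ofList_cons]
  have hnil : PySem.Set.discard (PySem.Set.ofList xs) s = [] := by
    rw [List.eq_nil_iff_forall_not_mem]
    intro y hy
    rw [PySem.Set.mem_discard] at hy
    exact hy.2 (h y ((PySem.Set.mem_ofList _ _).mp hy.1))
  rw [hnil]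

lemma pv_seen_single (sr : List (List (String × String))) (s : String)
    (hne : sr ≠ []) (h : ∀ r ∈ sr, pvStatusOf r = s) : pvSeen sr = [s] := by
  rw [pv_seen_eq]
  rcases sr with _ | ⟨r, l⟩
  · exact absurd rfl hne
  · simp only [List.map_cons]
    rw [h r List.mem_cons_self]
    exact pv_ofList_const s _ (by
      intro x hx
      rcases List.mem_map.mp hx with ⟨r', hr', rfl⟩
      exact h r' (List.mem_cons_of_mem _ hr'))

lemma pv_equal_false (sr : List (List (String × String))) (s : String)
    (h : ∃ r ∈ sr, pvStatusOf r ≠ s) : PySem.Set.equal (pvSeen sr) [s] = false := by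
  rcases h with ⟨r, hr, hrs⟩
  cases heq : PySem.Set.equal (pvSeen sr) [s] with
  | false => rfl
  | true =>
    exfalso
    have := ((PySem.Set.equal_iff _ _).mp heq (pvStatusOf r)).mp
      (by rw [pv_seen_eq, PySem.Set.mem_ofList]; exact List.mem_map.mpr ⟨r, hr, rfl⟩)
    simp at this
    exact hrs this

lemma pv_all_eq (sr : List (List (String × String))) (s : String) :
    (sr.all (fun r => pvStatusOf r == s) = true) ↔ ∀ r ∈ sr, pvStatusOf r = s := by
  simp [List.all_eq_true]

lemma pv_all_ne (sr : List (List (String × String))) (s : String) :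
    (sr.all (fun r => !(pvStatusOf r == s)) = true) ↔ ∀ r ∈ sr, pvStatusOf r ≠ s := by
  simp [List.all_eq_true]

lemma pv_all_nfb (sr : List (List (String × String))) :
    (sr.all (fun r => !(pvStatusOf r == "Fail") && !(pvStatusOf r == "Blocked")) = true) ↔
      ∀ r ∈ sr, pvStatusOf r ≠ "Fail" ∧ pvStatusOf r ≠ "Blocked" := by
  simp [List.all_eq_true]

lemma pv_and15 (b : Nat) (hb : b ≤ 15) : 15 &&& b = b := by
  interval_cases b <;> rfl

-- ===== VERDICT (by name: the statement is the Claim_ definition above) =====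
theorem calc_test_result_status_spec : Claim_equal_calc_test_result_status := by
  intro sr _hDom hPre
  unfold Spec_calc_test_result_status
  by_cases hne : sr = []
  · subst hne; rfl
  · have hA : calc_test_result_status sr =
        (((pvStatusMap.items.filter (fun kv => kv.2 = pvBits sr)).map (fun kv => kv.1)).headD "") := by
      unfold calc_test_result_status
      rw [if_neg hne]
      simp only
      rw [pv_fold sr hPre 15 (by decide), pv_and15 _ (pvBits_le sr)]
    by_cases hF : ∃ r ∈ sr, pvStatusOf r = "Fail"
    · rcases hF with ⟨rf, hrf, hf⟩
      have h1 : sr.all (fun r => pvStatusOf r == "Not Executed") = false :=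
        Bool.eq_false_iff.mpr (fun hc => by
          have := (pv_all_eq sr _).mp hc rf hrf; rw [hf] at this; exact absurd this (by decide))
      have h2 : sr.all (fun r => pvStatusOf r == "Pass") = false :=
        Bool.eq_false_iff.mpr (fun hc => by
          have := (pv_all_eq sr _).mp hc rf hrf; rw [hf] at this; exact absurd this (by decide))
      have h3 : sr.all (fun r => !(pvStatusOf r == "Fail") && !(pvStatusOf r == "Blocked")) = false :=
        Bool.eq_false_iff.mpr (fun hc => ((pv_all_nfb sr).mp hc rf hrf).1 hf)
      have h4 : sr.all (fun r => !(pvStatusOf r == "Fail")) = false :=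
        Bool.eq_false_iff.mpr (fun hc => (pv_all_ne sr _).mp hc rf hrf hf)
      have hbits : pvBits sr = 0 := by simp [pvBits, h1, h2, h3, h4]
      have hAv : calc_test_result_status sr = "Fail" := by rw [hA, hbits]; rfl
      have hcF : "Fail" ∈ pvSeen sr := (pv_mem_seen sr "Fail").mpr ⟨rf, hrf, hf⟩
      have hBv : calc_test_result_status_alt sr = "Fail" := by
        simp [calc_test_result_status_alt, hne, hcF]
      rw [hAv, hBv]
    · push Not at hF
      have hcF : "Fail" ∉ pvSeen sr := fun hc => by
        rcases (pv_mem_seen sr "Fail").mp hc with ⟨r, hr, he⟩; exact hF r hr he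
      have h4 : sr.all (fun r => !(pvStatusOf r == "Fail")) = true := (pv_all_ne sr _).mpr hF
      by_cases hB : ∃ r ∈ sr, pvStatusOf r = "Blocked"
      · rcases hB with ⟨rb, hrb, hb⟩
        have h1 : sr.all (fun r => pvStatusOf r == "Not Executed") = false :=
          Bool.eq_false_iff.mpr (fun hc => by
            have := (pv_all_eq sr _).mp hc rb hrb; rw [hb] at this; exact absurd this (by decide))
        have h2 : sr.all (fun r => pvStatusOf r == "Pass") = false :=
          Bool.eq_false_iff.mpr (fun hc => by
            have := (pv_all_eq sr _).mp hc rb hrb; rw [hb] at this; exact absurd this (by decide))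
        have h3 : sr.all (fun r => !(pvStatusOf r == "Fail") && !(pvStatusOf r == "Blocked")) = false :=
          Bool.eq_false_iff.mpr (fun hc => ((pv_all_nfb sr).mp hc rb hrb).2 hb)
        have hbits : pvBits sr = 1 := by simp [pvBits, h1, h2, h3, h4]
        have hAv : calc_test_result_status sr = "Blocked" := by rw [hA, hbits]; rfl
        have hcB : "Blocked" ∈ pvSeen sr := (pv_mem_seen sr "Blocked").mpr ⟨rb, hrb, hb⟩
        have hBv : calc_test_result_status_alt sr = "Blocked" := by
          simp [calc_test_result_status_alt, hne, hcF, hcB]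
        rw [hAv, hBv]
      · push Not at hB
        have hcB : "Blocked" ∉ pvSeen sr := fun hc => by
          rcases (pv_mem_seen sr "Blocked").mp hc with ⟨r, hr, he⟩; exact hB r hr he
        have h3 : sr.all (fun r => !(pvStatusOf r == "Fail") && !(pvStatusOf r == "Blocked")) = true :=
          (pv_all_nfb sr).mpr (fun r hr => ⟨hF r hr, hB r hr⟩)
        rcases List.exists_mem_of_ne_nil sr hne with ⟨r0, hr0⟩
        by_cases hP : ∀ r ∈ sr, pvStatusOf r = "Pass"
        · have h2 : sr.all (fun r => pvStatusOf r == "Pass") = true := (pv_all_eq sr _).mpr hP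
          have h1 : sr.all (fun r => pvStatusOf r == "Not Executed") = false :=
            Bool.eq_false_iff.mpr (fun hc => by
              have := (pv_all_eq sr _).mp hc r0 hr0; rw [hP r0 hr0] at this
              exact absurd this (by decide))
          have hbits : pvBits sr = 7 := by simp [pvBits, h1, h2, h3, h4]
          have hAv : calc_test_result_status sr = "Pass" := by rw [hA, hbits]; rfl
          have hseen : pvSeen sr = ["Pass"] := pv_seen_single sr "Pass" hne hP
          have hBv : calc_test_result_status_alt sr = "Pass" := by
            simp [calc_test_result_status_alt, hne, hseen]
          rw [hAv, hBv]
        · push Not at hP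
          rcases hP with ⟨rp, hrp, hps⟩
          have h2 : sr.all (fun r => pvStatusOf r == "Pass") = false :=
            Bool.eq_false_iff.mpr (fun hc => hps ((pv_all_eq sr _).mp hc rp hrp))
          have heqP : PySem.Set.equal (pvSeen sr) ["Pass"] = false :=
            pv_equal_false sr "Pass" ⟨rp, hrp, hps⟩
          by_cases hNE : ∀ r ∈ sr, pvStatusOf r = "Not Executed"
          · have h1 : sr.all (fun r => pvStatusOf r == "Not Executed") = true :=
              (pv_all_eq sr _).mpr hNE
            have hbits : pvBits sr = 11 := by simp [pvBits, h1, h2, h3, h4]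
            have hAv : calc_test_result_status sr = "Not Executed" := by rw [hA, hbits]; rfl
            have hseen : pvSeen sr = ["Not Executed"] := pv_seen_single sr "Not Executed" hne hNE
            have hBv : calc_test_result_status_alt sr = "Not Executed" := by
              simp [calc_test_result_status_alt, hne, hseen]
            rw [hAv, hBv]
          · push Not at hNE
            rcases hNE with ⟨rn, hrn, hns⟩
            have h1 : sr.all (fun r => pvStatusOf r == "Not Executed") = false :=
              Bool.eq_false_iff.mpr (fun hc => hns ((pv_all_eq sr _).mp hc rn hrn))
            have hbits : pvBits sr = 3 := by simp [pvBits, h1, h2, h3, h4]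
            have hAv : calc_test_result_status sr = "In Progress" := by rw [hA, hbits]; rfl
            have heqNE : PySem.Set.equal (pvSeen sr) ["Not Executed"] = false :=
              pv_equal_false sr "Not Executed" ⟨rn, hrn, hns⟩
            have hBv : calc_test_result_status_alt sr = "In Progress" := by
              cases hip : PySem.Set.equal (pvSeen sr) ["In Progress"] <;>
                simp [calc_test_result_status_alt, hne, hcF, hcB, heqP, heqNE, hip]
            rw [hAv, hBv]
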